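-- pv_equiv track=rewrite | github.com/tdodson0612/PyJam | main.py | parse_note_token
-- ===== SOURCE A (Python) =====
-- TEMPO_BASE = {
--     'w': 4.0,  # whole
--     'h': 2.0,  # half
--     'q': 1.0,  # quarter
--     'dq': 1.5, # dotted quarter
--     'e': 0.5,  # eighth
--     's': 0.25, # sixteenth
--     't': 1/3,  # triplet
-- }
--
-- def parse_note_token(token):
--     token = token.strip()
--     duration = None
--     # Find longest matching duration key suffix
--     for d in sorted(TEMPO_BASE.keys(), key=lambda x: -len(x)):
--         if token.endswith(d):
--             duration = d
--             notes_part = token[:-len(d)]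
--             break
--     if duration is None:
--         duration = 'q'  # default quarter
--         notes_part = token
--     # Parse chord if any
--     if notes_part.startswith('[') and notes_part.endswith(']'):
--         notes_str = notes_part[1:-1]
--         notes = []
--         i = 0
--         while i < len(notes_str):
--             if i+1 < len(notes_str) and notes_str[i+1] in ['#','b']:
--                 notes.append(notes_str[i:i+2])
--                 i += 2
--             else:
--                 notes.append(notes_str[i])
--                 i += 1
--     else:
--         if len(notes_part) == 0:
--             notes = ['R']  # rest if empty
--         elif len(notes_part) > 1 and notes_part[1] in ['#','b']:
--             notes = [notes_part[:2]]
--         else: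
--             notes = [notes_part]
--     return notes, duration
-- ===== SOURCE B (Python) =====
-- TEMPO_BASE = {
--     'w': 4.0,  # whole
--     'h': 2.0,  # half
--     'q': 1.0,  # quarter
--     'dq': 1.5, # dotted quarter
--     'e': 0.5,  # eighth
--     's': 0.25, # sixteenth
--     't': 1/3,  # triplet
-- }
--
-- def parse_note_token(token):
--     token = token.strip()
--     # Duration: try the 2-char suffix, then the 1-char suffix, else default 'q'.
--     if len(token) >= 2 and token[-2:] in TEMPO_BASE:
--         duration, notes_part = token[-2:], token[:-2]
--     elif token[-1:] in TEMPO_BASE: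
--         duration, notes_part = token[-1:], token[:-1]
--     else:
--         duration, notes_part = 'q', token
--     if notes_part.startswith('[') and notes_part.endswith(']'):
--         # Chord: one left-to-right pass; an accidental attaches to the
--         # single-char note just emitted, otherwise starts a new note.
--         notes = []
--         for ch in notes_part[1:-1]:
--             if ch in '#b' and notes and len(notes[-1]) == 1:
--                 notes[-1] += ch
--             else:
--                 notes.append(ch)
--     elif notes_part[1:2] in ('#', 'b'):
--         notes = [notes_part[:2]]
--     else:
--         notes = [notes_part or 'R']
--     return notes, duration
-- ===== Notes on version B (the rewrite author's own statement) =====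
-- stated objective: simpler
-- what changed: Duration is found by directly testing the 2-char then 1-char suffix slice for membership in the tempo table (no sorting of keys, no endswith scan), and the chord is parsed by one left fold that attaches an accidental to the just-emitted single-char note instead of an index-based while loop with i+1 lookahead; the single-note accidental test uses a slice membership instead of length checks.
import Mathlib
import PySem

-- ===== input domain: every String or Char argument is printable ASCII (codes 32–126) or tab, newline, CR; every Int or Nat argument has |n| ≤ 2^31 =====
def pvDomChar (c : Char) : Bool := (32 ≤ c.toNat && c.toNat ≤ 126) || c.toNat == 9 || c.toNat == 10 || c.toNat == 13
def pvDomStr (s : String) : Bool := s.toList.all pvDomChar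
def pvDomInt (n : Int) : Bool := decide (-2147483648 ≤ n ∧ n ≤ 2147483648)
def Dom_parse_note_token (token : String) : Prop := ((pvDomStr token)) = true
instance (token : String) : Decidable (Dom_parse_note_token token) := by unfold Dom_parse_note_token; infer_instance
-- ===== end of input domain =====

-- B replaces A's sort-keys-by-length + endswith scan by a direct 2-char-then-1-char suffix-slice
-- membership chain, A's index/lookahead chord while-loop by one left fold that attaches an
-- accidental to the single-char note just emitted, and A's length-guarded accidental test by a
-- slice membership (objective: simpler, same cost).

-- ===== PORT A =====
def pvTempoKeysA : List String := ["w", "h", "q", "dq", "e", "s", "t"]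

-- 'for d in sorted(TEMPO_BASE.keys(), key=-len): if token.endswith(d): ... break'
def pvFindDurA (tok : List Char) : List String → Option (String × List Char)
  | [] => none
  | d :: rest =>
    if PySem.Chars.endswith tok d.toList then
      some (d, PySem.Chars.slice tok none (some (-(d.toList.length : Int))))
    else pvFindDurA tok rest

-- the 'while i < len(notes_str)' loop with its i+1 lookahead
def pvChordA : List Char → List String
  | [] => []
  | [c] => [String.ofList [c]]
  | c1 :: c2 :: rest =>
    if c2 = '#' ∨ c2 = 'b' then String.ofList [c1, c2] :: pvChordA rest
    else String.ofList [c1] :: pvChordA (c2 :: rest)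

def pvNotesA (np : List Char) : List String :=
  if PySem.Chars.startswith np ['['] && PySem.Chars.endswith np [']'] then
    pvChordA (PySem.Chars.slice np (some 1) (some (-1)))
  else if np.length = 0 then ["R"]
  else if 1 < np.length ∧ (PySem.List.pyGet? np 1 = some '#' ∨ PySem.List.pyGet? np 1 = some 'b') then
    [String.ofList (PySem.Chars.slice np none (some 2))]
  else [String.ofList np]

def parse_note_token (token : String) : List String × String :=
  let tok := PySem.Chars.strip token.toList
  match pvFindDurA tok (PySem.List.sorted pvTempoKeysA (fun x => -(PySem.Str.len x : Int)) false) with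
  | some (d, np) => (pvNotesA np, d)
  | none => (pvNotesA tok, "q")

-- ===== PORT B =====
def pvTempoKeysB : List String := ["w", "h", "q", "dq", "e", "s", "t"]

-- body of 'for ch in notes_part[1:-1]': attach an accidental to the single-char last note
def pvStepB (acc : List String) (ch : Char) : List String :=
  match acc.getLast? with
  | some s =>
    if (ch = '#' ∨ ch = 'b') ∧ s.toList.length = 1 then
      acc.dropLast ++ [String.ofList (s.toList ++ [ch])]
    else acc ++ [String.ofList [ch]]
  | none => acc ++ [String.ofList [ch]]

def pvNotesB (np : List Char) : List String :=
  if PySem.Chars.startswith np ['['] && PySem.Chars.endswith np [']'] then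
    (PySem.Chars.slice np (some 1) (some (-1))).foldl pvStepB []
  else if String.ofList (PySem.Chars.slice np (some 1) (some 2)) ∈ ["#", "b"] then
    [String.ofList (PySem.Chars.slice np none (some 2))]
  else [if np = [] then "R" else String.ofList np]

def parse_note_token_alt (token : String) : List String × String :=
  let tok := PySem.Chars.strip token.toList
  -- 'if len(token) >= 2 and token[-2:] in TEMPO_BASE: ... elif token[-1:] in TEMPO_BASE: ... else: ...'
  let dn : String × List Char :=
    if 2 ≤ tok.length ∧ String.ofList (PySem.Chars.slice tok (some (-2)) none) ∈ pvTempoKeysB then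
      (String.ofList (PySem.Chars.slice tok (some (-2)) none), PySem.Chars.slice tok none (some (-2)))
    else if String.ofList (PySem.Chars.slice tok (some (-1)) none) ∈ pvTempoKeysB then
      (String.ofList (PySem.Chars.slice tok (some (-1)) none), PySem.Chars.slice tok none (some (-1)))
    else ("q", tok)
  (pvNotesB dn.2, dn.1)

-- ===== PRECONDITION & SPEC =====
def Spec_parse_note_token (token : String) (out : List String × String) : Prop := out = parse_note_token_alt token
instance (token : String) (out : List String × String) : Decidable (Spec_parse_note_token token out) := by unfold Spec_parse_note_token; infer_instance

-- ===== CLAIM (what is proved, stated in full; the proofs are below) =====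
def Claim_equal_parse_note_token : Prop := ∀ (token : String), Dom_parse_note_token token → Spec_parse_note_token token (parse_note_token token)

-- ===== LEMMAS AND PROOFS =====

lemma pv_suffix_one (xs : List Char) (a c : Char) : [a] <:+ xs ++ [c] ↔ c = a := by
  constructor
  · rintro ⟨t, ht⟩
    have := List.append_inj_right' ht (by simp)
    simp at this; exact this.symm
  · rintro rfl; exact ⟨xs, rfl⟩

lemma pv_suffix_two (xs : List Char) (a b c1 c2 : Char) :
    [a, b] <:+ xs ++ [c1, c2] ↔ c1 = a ∧ c2 = b := by
  constructor
  · rintro ⟨t, ht⟩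
    have := List.append_inj_right' ht (by simp)
    simp at this
    exact ⟨this.1.symm, this.2.symm⟩
  · rintro ⟨rfl, rfl⟩; exact ⟨xs, rfl⟩

lemma pv_suffix_one' (a c : Char) : [a] <:+ [c] ↔ c = a := by
  simpa using pv_suffix_one [] a c

lemma pv_suffix_two_one (a b c : Char) : ¬ ([a, b] <:+ [c]) := by
  rintro ⟨t, ht⟩
  have := congrArg List.length ht
  simp at this

lemma pv_suffix_one_two (xs : List Char) (a c1 c2 : Char) :
    [a] <:+ xs ++ [c1, c2] ↔ c2 = a := by
  rw [show xs ++ [c1, c2] = (xs ++ [c1]) ++ [c2] by simp]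
  exact pv_suffix_one _ _ _

-- A's scan over the sorted keys and B's two-slice membership chain pick the same suffix
lemma pv_dur_eq (tok : List Char) :
    pvFindDurA tok ["dq", "w", "h", "q", "e", "s", "t"] =
      (if 2 ≤ tok.length ∧ String.ofList (PySem.Chars.slice tok (some (-2)) none) ∈ pvTempoKeysB then
        some (String.ofList (PySem.Chars.slice tok (some (-2)) none), PySem.Chars.slice tok none (some (-2)))
      else if String.ofList (PySem.Chars.slice tok (some (-1)) none) ∈ pvTempoKeysB then
        some (String.ofList (PySem.Chars.slice tok (some (-1)) none), PySem.Chars.slice tok none (some (-1)))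
      else none) := by
  induction tok using List.reverseRecOn with
  | nil => decide
  | append_singleton xs c ih0 =>
    clear ih0
    induction xs using List.reverseRecOn with
    | nil =>
      simp only [pvFindDurA, pvTempoKeysB, PySem.Chars.endswith_iff,
        PySem.Chars.slice_eq_listSlice, PySem.List.slice_to_neg_one,
        PySem.List.slice_from_neg_one,
        show "dq".toList = ['d','q'] from by decide, show "w".toList = ['w'] from by decide,
        show "h".toList = ['h'] from by decide, show "q".toList = ['q'] from by decide,
        show "e".toList = ['e'] from by decide, show "s".toList = ['s'] from by decide,
        show "t".toList = ['t'] from by decide]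
      norm_num [pv_suffix_one', pv_suffix_two_one, List.mem_cons, ← String.toList_inj,
        show "dq".toList = ['d','q'] from by decide, show "w".toList = ['w'] from by decide,
        show "h".toList = ['h'] from by decide, show "q".toList = ['q'] from by decide,
        show "e".toList = ['e'] from by decide, show "s".toList = ['s'] from by decide,
        show "t".toList = ['t'] from by decide]
      by_cases h1 : c = 'w' <;> by_cases h2 : c = 'h' <;> by_cases h3 : c = 'q' <;>
        by_cases h4 : c = 'e' <;> by_cases h5 : c = 's' <;> by_cases h6 : c = 't' <;>
        simp_all <;> decide
    | append_singleton ys c1 ih1 =>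
      clear ih1
      rw [show ys ++ [c1] ++ [c] = ys ++ [c1, c] by simp]
      have h1 : PySem.List.slice (ys ++ [c1, c]) none (some (-1)) = ys ++ [c1] := by
        rw [PySem.List.slice_to_neg_one, show ys ++ [c1, c] = (ys ++ [c1]) ++ [c] by simp,
          List.dropLast_concat]
      have h2 : PySem.List.slice (ys ++ [c1, c]) none (some (-2)) = ys := by
        rw [PySem.List.slice_to_neg_ofNat _ 2 (by norm_num),
          show (ys ++ [c1, c]).length - 2 = ys.length by simp]
        exact List.take_left' rfl
      have h3 : PySem.List.slice (ys ++ [c1, c]) (some (-2)) none = [c1, c] := by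
        rw [PySem.List.slice_from_neg_ofNat _ 2 (by norm_num),
          show (ys ++ [c1, c]).length - 2 = ys.length by simp]
        exact List.drop_left' rfl
      have h4 : PySem.List.slice (ys ++ [c1, c]) (some (-1)) none = [c] := by
        rw [PySem.List.slice_from_neg_one,
          show ys ++ [c1, c] = (ys ++ [c1]) ++ [c] by simp,
          show ((ys ++ [c1]) ++ [c]).length - 1 = (ys ++ [c1]).length by simp]
        exact List.drop_left' rfl
      simp only [pvFindDurA, pvTempoKeysB, PySem.Chars.endswith_iff,
        PySem.Chars.slice_eq_listSlice,
        show "dq".toList = ['d','q'] from by decide, show "w".toList = ['w'] from by decide,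
        show "h".toList = ['h'] from by decide, show "q".toList = ['q'] from by decide,
        show "e".toList = ['e'] from by decide, show "s".toList = ['s'] from by decide,
        show "t".toList = ['t'] from by decide]
      have hlen : 2 ≤ (ys ++ [c1, c]).length := by simp
      norm_num [hlen, h1, h2, h3, h4, pv_suffix_one_two, pv_suffix_two, List.mem_cons, ← String.toList_inj,
        show "dq".toList = ['d','q'] from by decide, show "w".toList = ['w'] from by decide,
        show "h".toList = ['h'] from by decide, show "q".toList = ['q'] from by decide,
        show "e".toList = ['e'] from by decide, show "s".toList = ['s'] from by decide,
        show "t".toList = ['t'] from by decide]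
      by_cases hd : c1 = 'd' ∧ c = 'q'
      · simp only [if_pos hd]
        rcases hd with ⟨rfl, rfl⟩
        rfl
      · simp only [if_neg hd]
        by_cases k1 : c = 'w' <;> by_cases k2 : c = 'h' <;> by_cases k3 : c = 'q' <;>
          by_cases k4 : c = 'e' <;> by_cases k5 : c = 's' <;> by_cases k6 : c = 't' <;>
          simp_all

lemma pv_step_append (acc : List String) (ch : Char)
    (h : ∀ s, acc.getLast? = some s → s.toList.length = 1 → ¬(ch = '#' ∨ ch = 'b')) :
    pvStepB acc ch = acc ++ [String.ofList [ch]] := by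
  unfold pvStepB
  cases hl : acc.getLast? with
  | none => rfl
  | some s =>
    dsimp only
    rw [if_neg]
    rintro ⟨hch, hs⟩
    exact h s hl hs hch

lemma pv_step_attach (acc : List String) (s : String) (ch : Char)
    (hl : acc.getLast? = some s) (hs : s.toList.length = 1) (hch : ch = '#' ∨ ch = 'b') :
    pvStepB acc ch = acc.dropLast ++ [String.ofList (s.toList ++ [ch])] := by
  unfold pvStepB
  rw [hl]
  exact if_pos ⟨hch, hs⟩

-- B's lookbehind fold emits exactly the notes of A's lookahead pairing
lemma pv_chord_aux (cs : List Char) :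
    ∀ acc : List String,
      (∀ s, acc.getLast? = some s → s.toList.length = 1 →
        ∀ c, cs.head? = some c → ¬(c = '#' ∨ c = 'b')) →
      cs.foldl pvStepB acc = acc ++ pvChordA cs := by
  induction cs using pvChordA.induct with
  | case1 => intro acc _; simp [pvChordA]
  | case2 c =>
    intro acc hacc
    simp only [List.foldl_cons, List.foldl_nil, pvChordA]
    rw [pv_step_append]
    intro s hl hs
    exact hacc s hl hs c rfl
  | case3 c1 c2 rest hcond ih =>
    intro acc hacc
    simp only [List.foldl_cons, pvChordA, if_pos hcond]
    rw [pv_step_append acc c1 (fun s hl hs => hacc s hl hs c1 rfl)]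
    rw [pv_step_attach (acc ++ [String.ofList [c1]]) (String.ofList [c1]) c2 (by simp) (by simp) hcond]
    rw [ih]
    · simp
    · intro s hl hs
      simp at hl
      subst hl
      simp at hs
  | case4 c1 c2 rest hcond ih =>
    intro acc hacc
    rw [List.foldl_cons, pv_step_append acc c1 (fun s hl hs => hacc s hl hs c1 rfl),
      ih (acc ++ [String.ofList [c1]]) ?_]
    · conv_rhs => rw [pvChordA]
      rw [if_neg hcond]
      simp
    · intro s hl hs c hc
      simp at hc
      subst hc
      exact hcond

-- B's slice-membership accidental test coincides with A's length-guarded index test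
lemma pv_notes_eq (np : List Char) : pvNotesB np = pvNotesA np := by
  unfold pvNotesA pvNotesB
  by_cases hc : (PySem.Chars.startswith np ['['] && PySem.Chars.endswith np [']']) = true
  · rw [if_pos hc, if_pos hc]
    exact pv_chord_aux _ [] (by intro s hl; simp at hl)
  · rw [if_neg hc, if_neg hc]
    rcases np with _ | ⟨a, _ | ⟨b, rest⟩⟩
    · decide
    · have hs : PySem.Chars.slice [a] (some 1) (some 2) = [] := by
        simp [PySem.List.slice, PySem.List.clampIdx]
      rw [hs]
      norm_num [show String.ofList ([] : List Char) ∉ ["#", "b"] from by decide]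
    · have hs : PySem.Chars.slice (a :: b :: rest) (some 1) (some 2) = [b] := by
        simp [PySem.List.slice, PySem.List.clampIdx]
      have hg : PySem.List.pyGet? (a :: b :: rest) 1 = some b := by
        simp [PySem.List.pyGet?, PySem.List.pyIdx?]
      have hm : (String.ofList [b] = "#" ∨ String.ofList [b] = "b") ↔ (b = '#' ∨ b = 'b') := by
        constructor
        · rintro (h | h)
          · left; have := congrArg String.toList h; simpa using this
          · right; have := congrArg String.toList h; simpa using this
        · rintro (rfl | rfl) <;> [left; right] <;> rfl
      have hmem : String.ofList [b] ∈ ["#", "b"] ↔ (b = '#' ∨ b = 'b') := by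
        rw [List.mem_cons, List.mem_singleton]; exact hm
      rw [hs]
      by_cases hb : b = '#' ∨ b = 'b'
      · rw [if_pos (hmem.mpr hb), if_neg (show ¬(a :: b :: rest).length = 0 by simp),
          if_pos (show 1 < (a :: b :: rest).length ∧ _ from ⟨by simp, by rw [hg]; simpa using hb⟩)]
      · rw [if_neg (fun h => hb (hmem.mp h)), if_neg (show ¬(a :: b :: rest) = [] by simp),
          if_neg (show ¬(a :: b :: rest).length = 0 by simp),
          if_neg (show ¬(1 < (a :: b :: rest).length ∧ _) from fun h => hb (by simpa [hg] using h.2))]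

-- ===== VERDICT (by name: the statement is the Claim_ definition above) =====
theorem parse_note_token_spec : Claim_equal_parse_note_token := by
  intro token _
  unfold Spec_parse_note_token parse_note_token parse_note_token_alt
  have hk : PySem.List.sorted pvTempoKeysA (fun x => -(PySem.Str.len x : Int)) false
      = ["dq", "w", "h", "q", "e", "s", "t"] := by decide
  simp only [hk, pv_dur_eq]
  split_ifs <;> simp [pv_notes_eq]
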